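-- pv_equiv track=rewrite | github.com/kpercyro/MSE-433---Module-3-Warehousing | liam/solver.py | choose_item_type_for_release
-- ===== SOURCE A (Python) =====
-- from typing import Dict, List, Optional, Sequence, Tuple
--
-- def choose_item_type_for_release(
--     tote_counts: Dict[int, int],
--     active_order: List[Optional[int]],
--     active_pos: List[int],
--     belt_queues: List[List[int]],
--     remaining: List[Dict[int, int]],
-- ) -> Optional[int]:
--     candidates = [item for item, qty in tote_counts.items() if qty > 0]
--     if not candidates:
--         return None
--
--     best_item = None
--     best_rank = None
--
--     num_belts = len(belt_queues)
--
--     for item in candidates: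
--         # Tier 0: needed by currently active orders; prefer earliest belt index.
--         active_belt = None
--         active_need = 0
--         for b in range(num_belts):
--             o = active_order[b]
--             if o is None:
--                 continue
--             need = remaining[o].get(item, 0)
--             if need > 0:
--                 active_belt = b
--                 active_need = need
--                 break
--
--         if active_belt is not None:
--             rank = (0, active_belt, -active_need, item)
--         else:
--             # Tier 1: needed by future orders; prefer shorter queue distance.
--             future_best = None
--             for b in range(num_belts):
--                 if active_pos[b] < 0:
--                     start_pos = 0
--                 else:
--                     start_pos = active_pos[b] + 1
--
--                 q = belt_queues[b]
--                 for pos in range(start_pos, len(q)):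
--                     o = q[pos]
--                     if remaining[o].get(item, 0) > 0:
--                         dist = pos - active_pos[b] if active_pos[b] >= 0 else pos + 1
--                         cand = (dist, b)
--                         if future_best is None or cand < future_best:
--                             future_best = cand
--                         break
--
--             if future_best is not None:
--                 rank = (1, future_best[0], future_best[1], item)
--             else:
--                 # Tier 2: not needed anywhere (or already fulfilled)
--                 rank = (2, 0, 0, item)
--
--         if best_rank is None or rank < best_rank:
--             best_rank = rank
--             best_item = item
--
--     return best_item
-- ===== SOURCE B (Python) =====
-- from typing import Dict, List, Optional
--
-- def choose_item_type_for_release(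
--     tote_counts: Dict[int, int],
--     active_order: List[Optional[int]],
--     active_pos: List[int],
--     belt_queues: List[List[int]],
--     remaining: List[Dict[int, int]],
-- ) -> Optional[int]:
--     candidates = [item for item, qty in tote_counts.items() if qty > 0]
--     if not candidates:
--         return None
--
--     num_belts = len(belt_queues)
--
--     # One pass over the active orders: for each item, the earliest belt whose
--     # active order still needs it, with that need.
--     act = {}
--     for b, o in enumerate(active_order[:num_belts]):
--         if o is None:
--             continue
--         for item, need in remaining[o].items():
--             if need > 0 and item not in act:
--                 act[item] = (b, need)
--
--     # One pass over the belt queues: for each item, the minimal (distance, belt)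
--     # at which a future order needs it (first occurrence per belt counts).
--     fut = {}
--     for b, q in enumerate(belt_queues):
--         ap = active_pos[b]
--         start = 0 if ap < 0 else ap + 1
--         seen = set()
--         for off, o in enumerate(q[start:]):
--             for item, need in remaining[o].items():
--                 if need > 0 and item not in seen:
--                     seen.add(item)
--                     cand = (off + 1, b)
--                     if item not in fut or cand < fut[item]:
--                         fut[item] = cand
--
--     def rank(item):
--         if item in act:
--             b, need = act[item]
--             return (0, b, -need, item)
--         if item in fut:
--             d, b = fut[item]
--             return (1, d, b, item)
--         return (2, 0, 0, item)
--
--     return min(candidates, key=rank)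
-- ===== Notes on version B (the rewrite author's own statement) =====
-- stated objective: faster
-- what changed: Instead of re-scanning every belt's active order and queue once per candidate item, B makes one pass over the active orders and one pass over the belt queues, recording per item the earliest needing belt (act) and the minimal (distance, belt) (fut) in dicts, then ranks each candidate by two O(1) lookups and takes min(candidates, key=rank).
-- outside the precondition, e.g. on choose_item_type_for_release({1: 1}, [None], [-1], [[0, 5]], [{1: 1}]): A returns 1, B raises IndexError; on choose_item_type_for_release({1: 1}, [0], [], [[]], [{1: 1}]): A returns 1, B raises IndexError
import Mathlib
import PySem

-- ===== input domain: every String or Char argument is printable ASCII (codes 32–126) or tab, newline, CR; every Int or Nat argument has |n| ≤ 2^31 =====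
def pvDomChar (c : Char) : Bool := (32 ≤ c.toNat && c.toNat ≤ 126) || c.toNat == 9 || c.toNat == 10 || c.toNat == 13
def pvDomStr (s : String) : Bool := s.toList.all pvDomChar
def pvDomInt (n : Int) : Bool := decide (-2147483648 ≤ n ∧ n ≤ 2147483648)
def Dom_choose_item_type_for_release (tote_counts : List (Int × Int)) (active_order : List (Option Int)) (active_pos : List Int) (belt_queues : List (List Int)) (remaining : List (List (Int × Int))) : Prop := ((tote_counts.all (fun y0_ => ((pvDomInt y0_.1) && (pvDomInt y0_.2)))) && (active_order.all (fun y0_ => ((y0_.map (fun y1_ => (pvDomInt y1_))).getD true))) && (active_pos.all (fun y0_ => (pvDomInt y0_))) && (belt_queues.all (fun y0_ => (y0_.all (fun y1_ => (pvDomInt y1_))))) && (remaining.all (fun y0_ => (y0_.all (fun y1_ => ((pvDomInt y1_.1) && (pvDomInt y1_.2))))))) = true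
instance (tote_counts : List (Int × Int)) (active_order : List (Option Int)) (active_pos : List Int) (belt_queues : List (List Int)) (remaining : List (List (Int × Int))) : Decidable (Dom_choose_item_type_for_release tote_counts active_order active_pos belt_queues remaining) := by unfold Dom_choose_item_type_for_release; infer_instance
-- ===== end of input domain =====

-- B replaces A's per-candidate rescans of every belt and queue by one pass over active orders and one
-- pass over the queues that record each item's best tier-0/tier-1 rank in dicts (objective: faster).


-- ===== PORT A =====
-- shared accessor: Python's `remaining[o].get(item, 0)` (this exact expression occurs in both sources)
def pvNeed (remaining : List (List (Int × Int))) (o item : Int) : Int :=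
  (PySem.Dict.mk (PySem.List.pyGetD remaining o [])).getD item 0

-- Python's `<` on the 4-tuples `rank` (lexicographic); both sources compare ranks with it
def pvRankLt (r s : Int × Int × Int × Int) : Bool :=
  r.1 < s.1 || (r.1 == s.1 && (r.2.1 < s.2.1 || (r.2.1 == s.2.1 &&
    (r.2.2.1 < s.2.2.1 || (r.2.2.1 == s.2.2.1 && r.2.2.2 < s.2.2.2)))))

-- Python's `<` on the (dist, belt) pairs (lexicographic); both sources compare candidates with it
def pvPairLt (x y : Int × Int) : Bool := x.1 < y.1 || (x.1 == y.1 && x.2 < y.2)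

-- A: the tier-0 `for b in range(num_belts)` scan for one item (break at the first needing belt)
def pvActiveScanA (active_order : List (Option Int)) (remaining : List (List (Int × Int)))
    (item : Int) : List Int → Option (Int × Int)
  | [] => none
  | b :: bs =>
    match PySem.List.pyGetD active_order b none with
    | none => pvActiveScanA active_order remaining item bs
    | some o =>
      let need := pvNeed remaining o item
      if 0 < need then some (b, need) else pvActiveScanA active_order remaining item bs

-- A: the tier-1 inner `for pos in range(start_pos, len(q))` scan (break at the first needing order)
def pvBeltScanA (remaining : List (List (Int × Int))) (item : Int) (q : List Int) (ap : Int) :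
    List Int → Option Int
  | [] => none
  | pos :: rest =>
    let o := PySem.List.pyGetD q pos 0
    if 0 < pvNeed remaining o item then
      some (if 0 ≤ ap then pos - ap else pos + 1)
    else pvBeltScanA remaining item q ap rest

-- A: the tier-1 outer loop over belts maintaining `future_best`
def pvFutureA (active_pos : List Int) (belt_queues : List (List Int))
    (remaining : List (List (Int × Int))) (item : Int) :
    List Int → Option (Int × Int) → Option (Int × Int)
  | [], fb => fb
  | b :: bs, fb =>
    let ap := PySem.List.pyGetD active_pos b 0
    let start : Int := if ap < 0 then 0 else ap + 1
    let q := PySem.List.pyGetD belt_queues b []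
    let fb' :=
      match pvBeltScanA remaining item q ap (PySem.List.pyRange start (PySem.List.len q) 1) with
      | none => fb
      | some dist =>
        match fb with
        | none => some (dist, b)
        | some old => if pvPairLt (dist, b) old then some (dist, b) else some old
    pvFutureA active_pos belt_queues remaining item bs fb'

-- A: the rank computed for one candidate item
def pvRankA (active_order : List (Option Int)) (active_pos : List Int)
    (belt_queues : List (List Int)) (remaining : List (List (Int × Int))) (item : Int) :
    Int × Int × Int × Int :=
  let numBelts : Int := PySem.List.len belt_queues
  match pvActiveScanA active_order remaining item (PySem.List.pyRange 0 numBelts 1) with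
  | some (b, need) => (0, b, -need, item)
  | none =>
    match pvFutureA active_pos belt_queues remaining item (PySem.List.pyRange 0 numBelts 1) none with
    | some (d, b) => (1, d, b, item)
    | none => (2, 0, 0, item)

-- A: the main loop maintaining (best_item, best_rank)
def pvBestA (active_order : List (Option Int)) (active_pos : List Int)
    (belt_queues : List (List Int)) (remaining : List (List (Int × Int))) :
    List Int → Option Int × Option (Int × Int × Int × Int) → Option Int × Option (Int × Int × Int × Int)
  | [], st => st
  | it :: rest, (bi, br) =>
    let r := pvRankA active_order active_pos belt_queues remaining it
    let st' :=
      match br with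
      | none => (some it, some r)
      | some br' => if pvRankLt r br' then (some it, some r) else (bi, some br')
    pvBestA active_order active_pos belt_queues remaining rest st'

def choose_item_type_for_release (tote_counts : List (Int × Int)) (active_order : List (Option Int)) (active_pos : List Int) (belt_queues : List (List Int)) (remaining : List (List (Int × Int))) : Option Int :=
  let candidates := (tote_counts.filter (fun p => 0 < p.2)).map (·.1)
  if candidates.isEmpty then none
  else (pvBestA active_order active_pos belt_queues remaining candidates (none, none)).1

-- ===== PORT B =====
-- B: one pass over the (truncated) active orders: earliest belt needing each item, with its need
def pvActB (ao_slice : List (Option Int)) (remaining : List (List (Int × Int))) :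
    PySem.Dict Int (Int × Int) :=
  (PySem.List.enumerate ao_slice 0).foldl (fun act p =>
    match p.2 with
    | none => act
    | some o =>
      (PySem.List.pyGetD remaining o []).foldl (fun act q =>
        if 0 < q.2 && !(act.contains q.1) then act.insert q.1 (p.1, q.2) else act) act)
    PySem.Dict.empty

-- B: one pass over the belt queues: minimal (distance, belt) needing each item
def pvFutB (active_pos : List Int) (belt_queues : List (List Int))
    (remaining : List (List (Int × Int))) : PySem.Dict Int (Int × Int) :=
  (PySem.List.enumerate belt_queues 0).foldl (fun fut bq =>
    let ap := PySem.List.pyGetD active_pos bq.1 0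
    let start : Int := if ap < 0 then 0 else ap + 1
    ((PySem.List.enumerate (PySem.List.slice bq.2 (some start) none) 0).foldl (fun sf oo =>
        (PySem.List.pyGetD remaining oo.2 []).foldl (fun sf q =>
          if 0 < q.2 && !(PySem.Set.contains sf.1 q.1) then
            (PySem.Set.add sf.1 q.1,
             match sf.2.get? q.1 with
             | none => sf.2.insert q.1 (oo.1 + 1, bq.1)
             | some old =>
               if pvPairLt (oo.1 + 1, bq.1) old then sf.2.insert q.1 (oo.1 + 1, bq.1) else sf.2)
          else sf) sf)
      ((PySem.Set.empty : PySem.Set Int), fut)).2)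
    PySem.Dict.empty

-- B: rank of an item is two dict lookups
def pvRankB (act fut : PySem.Dict Int (Int × Int)) (item : Int) : Int × Int × Int × Int :=
  match act.get? item with
  | some (b, need) => (0, b, -need, item)
  | none =>
    match fut.get? item with
    | some (d, b) => (1, d, b, item)
    | none => (2, 0, 0, item)

-- B: Python's min(candidates, key=rank) — first element with lexicographically least rank
def pvMinByRank (key : Int → Int × Int × Int × Int) : Int → List Int → Int
  | best, [] => best
  | best, x :: xs =>
    if pvRankLt (key x) (key best) then pvMinByRank key x xs else pvMinByRank key best xs

def choose_item_type_for_release_alt (tote_counts : List (Int × Int)) (active_order : List (Option Int)) (active_pos : List Int) (belt_queues : List (List Int)) (remaining : List (List (Int × Int))) : Option Int :=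
  let candidates := (tote_counts.filter (fun p => 0 < p.2)).map (·.1)
  match candidates with
  | [] => none
  | c :: cs =>
    let act := pvActB (PySem.List.slice active_order none (some (PySem.List.len belt_queues)))
      remaining
    let fut := pvFutB active_pos belt_queues remaining
    some (pvMinByRank (pvRankB act fut) c cs)

-- ===== PRECONDITION & SPEC =====
-- Pre_ excludes (i) association lists with duplicate keys inside `remaining` (no Python dict produces
-- them); and, when some tote count is positive (otherwise A reads nothing and returns None),
-- (ii) inputs where the scans would raise IndexError: active_order/active_pos shorter than
-- belt_queues, or an out-of-range order id among the scanned active orders or among the queue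
-- positions after the active position. A can still return on some such inputs by breaking out of a
-- scan before the bad access (see the cited examples), but B's single full passes raise there.
def Pre_choose_item_type_for_release (tote_counts : List (Int × Int)) (active_order : List (Option Int)) (active_pos : List Int) (belt_queues : List (List Int)) (remaining : List (List (Int × Int))) : Prop :=
  (∀ d ∈ remaining, (d.map Prod.fst).Nodup) ∧
  (tote_counts.any (fun p => 0 < p.2) = true →
    belt_queues.length ≤ active_order.length ∧ belt_queues.length ≤ active_pos.length ∧
    (∀ o ∈ active_order.take belt_queues.length, ∀ i ∈ o,
      -(remaining.length : Int) ≤ i ∧ i < remaining.length) ∧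
    (∀ bp ∈ belt_queues.zip active_pos,
      ∀ i ∈ bp.1.drop (if bp.2 < 0 then 0 else bp.2 + 1).toNat,
      -(remaining.length : Int) ≤ i ∧ i < remaining.length))
instance (tote_counts : List (Int × Int)) (active_order : List (Option Int)) (active_pos : List Int) (belt_queues : List (List Int)) (remaining : List (List (Int × Int))) : Decidable (Pre_choose_item_type_for_release tote_counts active_order active_pos belt_queues remaining) := by unfold Pre_choose_item_type_for_release; infer_instance

def pvWitness_choose_item_type_for_release : (List (Int × Int)) × List (Option Int) × List Int × List (List Int) × (List (List (Int × Int))) :=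
  ([(1, 2), (3, 1)], [some 0], [0], [[0]], [[(1, 1), (3, 2)]])

def Spec_choose_item_type_for_release (tote_counts : List (Int × Int)) (active_order : List (Option Int)) (active_pos : List Int) (belt_queues : List (List Int)) (remaining : List (List (Int × Int))) (out : Option Int) : Prop := out = choose_item_type_for_release_alt tote_counts active_order active_pos belt_queues remaining
instance (tote_counts : List (Int × Int)) (active_order : List (Option Int)) (active_pos : List Int) (belt_queues : List (List Int)) (remaining : List (List (Int × Int))) (out : Option Int) : Decidable (Spec_choose_item_type_for_release tote_counts active_order active_pos belt_queues remaining out) := by unfold Spec_choose_item_type_for_release; infer_instance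

-- ===== CLAIM (what is proved, stated in full; the proofs are below) =====
def Claim_equal_choose_item_type_for_release : Prop := ∀ (tote_counts : List (Int × Int)) (active_order : List (Option Int)) (active_pos : List Int) (belt_queues : List (List Int)) (remaining : List (List (Int × Int))), Dom_choose_item_type_for_release tote_counts active_order active_pos belt_queues remaining → Pre_choose_item_type_for_release tote_counts active_order active_pos belt_queues remaining → Spec_choose_item_type_for_release tote_counts active_order active_pos belt_queues remaining (choose_item_type_for_release tote_counts active_order active_pos belt_queues remaining)

-- ===== LEMMAS AND PROOFS =====


-- lookup in one raw association list (the value behind Python's d.get(item, 0) on that dict)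
def pvNeedIn (d : List (Int × Int)) (item : Int) : Int := (PySem.Dict.mk d).getD item 0

-- value-level min-update on (dist, belt) candidates
def pvMinU (old : Option (Int × Int)) (c : Int × Int) : Int × Int :=
  match old with
  | none => c
  | some o => if pvPairLt c o then c else o

-- offset of the first order in a position list that still needs `item`
def pvFirstNeed (remaining : List (List (Int × Int))) (item : Int) : List Int → Option Int
  | [] => none
  | o :: t =>
    if 0 < pvNeed remaining o item then some 0 else (pvFirstNeed remaining item t).map (· + 1)

theorem pvNeed_eq_needIn (rem : List (List (Int × Int))) (o item : Int) :
    pvNeed rem o item = pvNeedIn (PySem.List.pyGetD rem o []) item := rfl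

theorem pvNeedIn_nil (item : Int) : pvNeedIn [] item = 0 := by
  simp [pvNeedIn, PySem.Dict.getD, PySem.Dict.get?]
theorem pvNeedIn_cons (k v : Int) (rest : List (Int × Int)) (item : Int) :
    pvNeedIn ((k, v) :: rest) item = if k = item then v else pvNeedIn rest item := by
  simp [pvNeedIn, PySem.Dict.getD_eq_get?_getD, PySem.Dict.get?_mk_cons]
  split <;> simp
theorem pvNeedIn_not_mem (d : List (Int × Int)) (item : Int) (h : item ∉ d.map Prod.fst) :
    pvNeedIn d item = 0 := by
  induction d with
  | nil => exact pvNeedIn_nil item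
  | cons q rest ih =>
    obtain ⟨k, v⟩ := q
    simp only [List.map_cons, List.mem_cons, not_or] at h
    rw [pvNeedIn_cons, if_neg (fun hk => h.1 hk.symm)]
    exact ih h.2
theorem pvRemNodup (rem : List (List (Int × Int))) (hrem : ∀ d ∈ rem, (d.map Prod.fst).Nodup)
    (o : Int) : ((PySem.List.pyGetD rem o []).map Prod.fst).Nodup := by
  unfold PySem.List.pyGetD
  cases hg : PySem.List.pyGet? rem o with
  | none => simp
  | some d => simpa using hrem d (PySem.List.mem_of_pyGet?_eq_some rem hg)
theorem pvInnerAct (item b : Int) :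
    ∀ (d : List (Int × Int)), (d.map Prod.fst).Nodup →
    ∀ (act0 : PySem.Dict Int (Int × Int)),
    (d.foldl (fun act q => if 0 < q.2 && !(act.contains q.1) then act.insert q.1 (b, q.2) else act)
        act0).get? item
    = if act0.contains item = false ∧ 0 < pvNeedIn d item then some (b, pvNeedIn d item)
      else act0.get? item := by
  intro d
  induction d with
  | nil => intro _ act0; simp [pvNeedIn_nil]
  | cons q rest ih =>
    obtain ⟨k, v⟩ := q
    intro hnd act0
    simp only [List.map_cons, List.nodup_cons] at hnd
    obtain ⟨hk_notmem, hnd'⟩ := hnd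
    simp only [List.foldl_cons]
    by_cases hk : k = item
    · rw [pvNeedIn_cons, if_pos hk]
      subst hk
      have hrest0 : pvNeedIn rest k = 0 := pvNeedIn_not_mem rest k hk_notmem
      by_cases hc : act0.contains k
      · have hg : (0 < v && !(act0.contains k)) = false := by simp [hc]
        rw [hg, if_neg (by simp)]
        rw [ih hnd' act0, hrest0]
        simp [hc]
      · have hcf : act0.contains k = false := by simpa using hc
        by_cases hv : 0 < v
        · have hg : (0 < v && !(act0.contains k)) = true := by simp [hcf, hv]
          rw [hg, if_pos rfl]
          rw [ih hnd' (act0.insert k (b, v)), hrest0]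
          simp [PySem.Dict.get?_insert_self, hcf, hv]
        · have hg : (0 < v && !(act0.contains k)) = false := by simp [hv]
          rw [hg, if_neg (by simp)]
          rw [ih hnd' act0, hrest0]
          simp [hv]
    · rw [pvNeedIn_cons, if_neg hk]
      by_cases hg : (0 < v && !(act0.contains k)) = true
      · rw [if_pos hg, ih hnd' (act0.insert k (b, v))]
        rw [PySem.Dict.get?_insert_of_ne (hne := fun h => hk h.symm)]
        have : (act0.insert k (b, v)).contains item = act0.contains item := by
          rw [PySem.Dict.contains_insert]
          have hik : (item == k) = false := by simp; exact fun h => hk h.symm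
          simp [hik]
        rw [this]
      · rw [if_neg hg, ih hnd' act0]
theorem pvActiveScanA_append (ao : List (Option Int)) (rem : List (List (Int × Int))) (item : Int)
    (L1 L2 : List Int) :
    pvActiveScanA ao rem item (L1 ++ L2)
    = match pvActiveScanA ao rem item L1 with
      | some v => some v
      | none => pvActiveScanA ao rem item L2 := by
  induction L1 with
  | nil => simp [pvActiveScanA]
  | cons j t ih =>
    simp only [List.cons_append, pvActiveScanA]
    cases PySem.List.pyGetD ao j none with
    | none => exact ih
    | some o =>
      simp only []
      split
      · rfl
      · exact ih
theorem pvActiveScanA_none (ao : List (Option Int)) (rem : List (List (Int × Int))) (item : Int)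
    (L : List Int) (h : ∀ j ∈ L, PySem.List.pyGetD ao j none = none) :
    pvActiveScanA ao rem item L = none := by
  induction L with
  | nil => rfl
  | cons j t ih =>
    simp only [pvActiveScanA, h j (List.mem_cons_self)]
    exact ih (fun x hx => h x (List.mem_cons_of_mem _ hx))
theorem pvActBridge (ao : List (Option Int)) (rem : List (List (Int × Int)))
    (hrem : ∀ d ∈ rem, (d.map Prod.fst).Nodup) (item : Int) :
    ∀ (bs : List Int) (act0 : PySem.Dict Int (Int × Int)),
    ((bs.foldl (fun act j =>
        match PySem.List.pyGetD ao j none with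
        | none => act
        | some o =>
          (PySem.List.pyGetD rem o []).foldl
            (fun act q => if 0 < q.2 && !(act.contains q.1) then act.insert q.1 (j, q.2) else act)
            act) act0).get? item)
    = match act0.get? item with
      | some v => some v
      | none => pvActiveScanA ao rem item bs := by
  intro bs
  induction bs with
  | nil => intro act0; cases h : act0.get? item <;> simp [pvActiveScanA, h]
  | cons j t ih =>
    intro act0
    simp only [List.foldl_cons, pvActiveScanA]
    cases hao : PySem.List.pyGetD ao j none with
    | none => exact ih act0
    | some o =>
      rw [ih]
      have hinner := pvInnerAct item j (PySem.List.pyGetD rem o [])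
        (pvRemNodup rem hrem o) act0
      rw [← pvNeed_eq_needIn] at hinner
      cases h0 : act0.get? item with
      | some v =>
        have hc : act0.contains item = true := by
          rw [PySem.Dict.contains_eq_isSome_get?, h0]; rfl
        rw [hinner, if_neg (by simp [hc]), h0]
      | none =>
        have hc : act0.contains item = false := by
          rw [PySem.Dict.contains_eq_isSome_get?, h0]; rfl
        by_cases hneed : 0 < pvNeed rem o item
        · rw [hinner, if_pos ⟨hc, hneed⟩]
          simp only [if_pos hneed]
        · rw [hinner, if_neg (fun hh => hneed hh.2), h0]
          simp only [if_neg hneed]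
theorem pvTakeGetD (ao : List (Option Int)) (n : Nat) (j : Int) (h0 : 0 ≤ j)
    (h1 : j < ((ao.take n).length : Int)) :
    PySem.List.pyGetD (ao.take n) j none = PySem.List.pyGetD ao j none := by
  rw [PySem.List.pyGetD_of_nonneg (h := h0), PySem.List.pyGetD_of_nonneg (h := h0)]
  have hj : j.toNat < (ao.take n).length := by omega
  have hj2 : j.toNat < n := by simp at hj; omega
  simp [List.getD, hj2]

theorem pvOutGetD (ao : List (Option Int)) (j : Int) (h0 : 0 ≤ j) (h1 : (ao.length : Int) ≤ j) :
    PySem.List.pyGetD ao j none = none := by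
  rw [PySem.List.pyGetD_of_nonneg (h := h0)]
  exact List.getD_eq_default _ _ (by omega)

theorem pvActEq (ao : List (Option Int)) (bq : List (List Int)) (rem : List (List (Int × Int)))
    (hrem : ∀ d ∈ rem, (d.map Prod.fst).Nodup) (item : Int) :
    (pvActB (PySem.List.slice ao none (some (PySem.List.len bq))) rem).get? item
    = pvActiveScanA ao rem item (PySem.List.pyRange 0 (PySem.List.len bq) 1) := by
  have hslice : PySem.List.slice ao none (some (PySem.List.len bq)) = ao.take bq.length := by
    simp [PySem.List.len]
  rw [pvActB, hslice, PySem.List.enumerate_eq_map_pyRange (d := none), List.foldl_map]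
  have hcongr : (PySem.List.pyRange 0 (PySem.List.len (ao.take bq.length)) 1).foldl
      (fun act j =>
        match (PySem.List.pyGetD (ao.take bq.length) j none) with
        | none => act
        | some o =>
          (PySem.List.pyGetD rem o []).foldl
            (fun act q => if 0 < q.2 && !(act.contains q.1) then act.insert q.1 (j, q.2) else act)
            act) PySem.Dict.empty
      = (PySem.List.pyRange 0 (PySem.List.len (ao.take bq.length)) 1).foldl
      (fun act j =>
        match (PySem.List.pyGetD ao j none) with
        | none => act
        | some o =>
          (PySem.List.pyGetD rem o []).foldl
            (fun act q => if 0 < q.2 && !(act.contains q.1) then act.insert q.1 (j, q.2) else act)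
            act) PySem.Dict.empty := by
    apply PySem.List.foldl_congr_mem
    intro acc x hx
    rw [PySem.List.mem_pyRange_one] at hx
    rw [pvTakeGetD ao bq.length x hx.1 (by simpa using hx.2)]
  rw [hcongr, pvActBridge ao rem hrem item]
  rw [PySem.Dict.get?_empty]
  have hle : ((ao.take bq.length).length : Int) ≤ (bq.length : Int) := by
    simp
  have hsplit : PySem.List.pyRange 0 (PySem.List.len bq) 1
      = PySem.List.pyRange 0 (PySem.List.len (ao.take bq.length)) 1
        ++ PySem.List.pyRange ((ao.take bq.length).length : Int) (PySem.List.len bq) 1 := by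
    simp only [PySem.List.len_eq]
    exact PySem.List.pyRange_one_append 0 _ _ (by positivity) hle
  rw [hsplit, pvActiveScanA_append]
  have hnone : pvActiveScanA ao rem item
      (PySem.List.pyRange ((ao.take bq.length).length : Int) (PySem.List.len bq) 1) = none := by
    apply pvActiveScanA_none
    intro j hj
    simp only [PySem.List.len_eq] at hj
    rw [PySem.List.mem_pyRange_one] at hj
    apply pvOutGetD ao j (le_trans (by positivity) hj.1)
    have := hj.1
    simp at this ⊢
    omega
  rw [hnone]
  cases pvActiveScanA ao rem item (PySem.List.pyRange 0 (PySem.List.len (ao.take bq.length)) 1) <;> rfl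
theorem pvSetContainsAdd (s : PySem.Set Int) (x y : Int) :
    PySem.Set.contains (PySem.Set.add s x) y = (y == x || PySem.Set.contains s y) := by
  simp [PySem.Set.contains, PySem.Set.add]
  by_cases hx : x ∈ s
  · simp [hx]
    by_cases hy : y = x <;> simp [hy, hx]
  · simp [hx]
    by_cases hy : y = x <;> simp [hy]

theorem pvInnerMost (_rem : List (List (Int × Int))) (item : Int) (cand : Int × Int) :
    ∀ (d : List (Int × Int)), (d.map Prod.fst).Nodup →
    ∀ (seen : PySem.Set Int) (fut : PySem.Dict Int (Int × Int)),
    (PySem.Set.contains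
        (d.foldl (fun sf q =>
          if 0 < q.2 && !(PySem.Set.contains sf.1 q.1) then
            (PySem.Set.add sf.1 q.1,
             match sf.2.get? q.1 with
             | none => sf.2.insert q.1 cand
             | some old => if pvPairLt cand old then sf.2.insert q.1 cand else sf.2)
          else sf) (seen, fut)).1 item
      = (PySem.Set.contains seen item || decide (0 < pvNeedIn d item))) ∧
    ((d.foldl (fun sf q =>
          if 0 < q.2 && !(PySem.Set.contains sf.1 q.1) then
            (PySem.Set.add sf.1 q.1,
             match sf.2.get? q.1 with
             | none => sf.2.insert q.1 cand
             | some old => if pvPairLt cand old then sf.2.insert q.1 cand else sf.2)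
          else sf) (seen, fut)).2.get? item
      = if PySem.Set.contains seen item = false ∧ 0 < pvNeedIn d item
        then some (pvMinU (fut.get? item) cand) else fut.get? item) := by
  intro d
  induction d with
  | nil =>
    intro _ seen fut
    constructor
    · simp [pvNeedIn_nil]
    · rw [if_neg (by simp [pvNeedIn_nil])]
      rfl
  | cons q rest ih =>
    obtain ⟨k, v⟩ := q
    intro hnd seen fut
    simp only [List.map_cons, List.nodup_cons] at hnd
    obtain ⟨hk_notmem, hnd'⟩ := hnd
    simp only [List.foldl_cons]
    by_cases hk : k = item
    · subst hk
      rw [pvNeedIn_cons, if_pos rfl]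
      have hrest0 : pvNeedIn rest k = 0 := pvNeedIn_not_mem rest k hk_notmem
      by_cases hc : k ∈ seen
      · have hcb : PySem.Set.contains seen k = true := by
          simp [PySem.Set.contains, hc]
        have hg : (0 < v && !(PySem.Set.contains seen k)) = false := by simp [hc]
        rw [hg]
        simp only [Bool.false_eq_true, if_false]
        obtain ⟨ih1, ih2⟩ := ih hnd' seen fut
        constructor
        · rw [ih1, hrest0, hcb]; simp
        · rw [ih2, if_neg (by simp [hc]), if_neg (by simp [hc])]
      · have hcb : PySem.Set.contains seen k = false := by
          simp [PySem.Set.contains, hc]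
        by_cases hv : 0 < v
        · have hg : (0 < v && !(PySem.Set.contains seen k)) = true := by simp [hc, hv]
          rw [hg]
          simp only [if_true]
          obtain ⟨ih1, ih2⟩ := ih hnd'
            (PySem.Set.add seen k)
            (match fut.get? k with
             | none => fut.insert k cand
             | some old => if pvPairLt cand old then fut.insert k cand else fut)
          have hseen' : PySem.Set.contains (PySem.Set.add seen k) k = true := by
            rw [pvSetContainsAdd]; simp
          constructor
          · rw [ih1, hseen', hcb]; simp [hv]
          · have hmem' : k ∈ PySem.Set.add seen k := by
              simp [PySem.Set.contains, PySem.Set.add]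
              split <;> simp_all
            rw [ih2, if_neg (by simp [hmem']), if_pos ⟨hcb, hv⟩]
            cases hf : fut.get? k with
            | none => simp [pvMinU, PySem.Dict.get?_insert_self]
            | some old =>
              simp only [pvMinU]
              by_cases hlt : pvPairLt cand old
              · simp [hlt, PySem.Dict.get?_insert_self]
              · simp [hlt, hf]
        · have hg : (0 < v && !(PySem.Set.contains seen k)) = false := by simp [hv]
          rw [hg]
          simp only [Bool.false_eq_true, if_false]
          obtain ⟨ih1, ih2⟩ := ih hnd' seen fut
          constructor
          · rw [ih1, hrest0]
            simp [hv]
          · rw [ih2, if_neg (by simp [hrest0]), if_neg (by simp [hv])]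
    · rw [pvNeedIn_cons, if_neg hk]
      by_cases hg : (0 < v && !(PySem.Set.contains seen k)) = true
      · rw [if_pos hg]
        obtain ⟨ih1, ih2⟩ := ih hnd'
          (PySem.Set.add seen k)
          (match fut.get? k with
           | none => fut.insert k cand
           | some old => if pvPairLt cand old then fut.insert k cand else fut)
        have hik : (item == k) = false := by simp; exact fun h => hk h.symm
        have hseen' : PySem.Set.contains (PySem.Set.add seen k) item
            = PySem.Set.contains seen item := by
          rw [pvSetContainsAdd, hik]; simp
        have hfut' : (match fut.get? k with
             | none => fut.insert k cand
             | some old => if pvPairLt cand old then fut.insert k cand else fut).get? item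
            = fut.get? item := by
          cases fut.get? k with
          | none => exact PySem.Dict.get?_insert_of_ne fut cand (fun h => hk (Eq.symm h))
          | some old =>
            by_cases hlt : pvPairLt cand old
            · simp only [hlt, if_true]
              exact PySem.Dict.get?_insert_of_ne fut cand (fun h => hk (Eq.symm h))
            · simp [hlt]
        constructor
        · rw [ih1, hseen']
        · rw [ih2, hfut', hseen']
      · rw [if_neg hg]
        exact ih hnd' seen fut
theorem pvInnerBelt (rem : List (List (Int × Int))) (hrem : ∀ d ∈ rem, (d.map Prod.fst).Nodup)
    (item b : Int) :
    ∀ (os : List Int) (s0 : Int) (seen : PySem.Set Int) (fut : PySem.Dict Int (Int × Int)),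
    ((PySem.List.enumerate os s0).foldl (fun sf oo =>
        (PySem.List.pyGetD rem oo.2 []).foldl (fun sf q =>
          if 0 < q.2 && !(PySem.Set.contains sf.1 q.1) then
            (PySem.Set.add sf.1 q.1,
             match sf.2.get? q.1 with
             | none => sf.2.insert q.1 (oo.1 + 1, b)
             | some old =>
               if pvPairLt (oo.1 + 1, b) old then sf.2.insert q.1 (oo.1 + 1, b) else sf.2)
          else sf) sf) (seen, fut)).2.get? item
    = if PySem.Set.contains seen item = true then fut.get? item
      else
        match pvFirstNeed rem item os with
        | none => fut.get? item
        | some off => some (pvMinU (fut.get? item) (s0 + off + 1, b)) := by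
  intro os
  induction os with
  | nil =>
    intro s0 seen fut
    rw [PySem.List.enumerate_nil]
    cases hc : PySem.Set.contains seen item
    · simp [pvFirstNeed]
    · simp
  | cons o t ih =>
    intro s0 seen fut
    rw [PySem.List.enumerate_cons, List.foldl_cons]
    obtain ⟨im1, im2⟩ := pvInnerMost rem item (s0 + 1, b) (PySem.List.pyGetD rem o [])
      (pvRemNodup rem hrem o) seen fut
    have heta := Prod.mk.eta (p := ((PySem.List.pyGetD rem o []).foldl (fun sf q =>
          if 0 < q.2 && !(PySem.Set.contains sf.1 q.1) then
            (PySem.Set.add sf.1 q.1,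
             match sf.2.get? q.1 with
             | none => sf.2.insert q.1 (s0 + 1, b)
             | some old =>
               if pvPairLt (s0 + 1, b) old then sf.2.insert q.1 (s0 + 1, b) else sf.2)
          else sf) (seen, fut)))
    rw [← heta, ih (s0 + 1) _ _, im1, im2]
    simp only [pvFirstNeed, ← pvNeed_eq_needIn]
    by_cases hc : item ∈ seen
    · simp [PySem.Set.contains, hc]
    · by_cases hneed : 0 < pvNeed rem o item
      · simp [PySem.Set.contains, hc, hneed]
      · simp only [if_neg hneed]
        cases hft : pvFirstNeed rem item t with
        | none => simp [PySem.Set.contains, hc, hneed]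
        | some off =>
          simp [PySem.Set.contains, hc, hneed]
          ring_nf
theorem pvBeltA (rem : List (List (Int × Int))) (item : Int) (q : List Int) (ap : Int) :
    ∀ (k : Nat) (s : Nat), q.length - s = k →
    pvBeltScanA rem item q ap (PySem.List.pyRange (s : Int) (PySem.List.len q) 1)
    = (pvFirstNeed rem item (q.drop s)).map
        (fun off => if 0 ≤ ap then (s : Int) + off - ap else (s : Int) + off + 1) := by
  intro k
  induction k with
  | zero =>
    intro s hs
    have hle : q.length ≤ s := by omega
    rw [PySem.List.pyRange_one_eq_nil (by simp; exact_mod_cast hle)]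
    rw [List.drop_of_length_le hle]
    rfl
  | succ k ihk =>
    intro s hs
    have hlt : s < q.length := by omega
    rw [PySem.List.pyRange_one_cons (by simp; exact_mod_cast hlt)]
    have hget : PySem.List.pyGetD q (s : Int) 0 = q[s] := by
      rw [PySem.List.pyGetD_of_nonneg (h := by positivity)]
      simp [List.getD, hlt]
    have hdrop : q.drop s = q[s] :: q.drop (s + 1) := List.drop_eq_getElem_cons hlt
    rw [hdrop]
    simp only [pvBeltScanA, pvFirstNeed, hget]
    by_cases hneed : 0 < pvNeed rem q[s] item
    · rw [if_pos hneed, if_pos hneed]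
      simp only [Option.map_some]
      by_cases hap : 0 ≤ ap <;> simp [hap]
    · rw [if_neg hneed, if_neg hneed]
      have hcast : (s : Int) + 1 = ((s + 1 : Nat) : Int) := by push_cast; ring
      rw [hcast, ihk (s + 1) (by omega)]
      cases pvFirstNeed rem item (q.drop (s + 1)) with
      | none => rfl
      | some off =>
        simp only [Option.map_some]
        by_cases hap : 0 ≤ ap <;> simp [hap] <;> ring
theorem pvFutBridge (apos : List Int) (bq : List (List Int)) (rem : List (List (Int × Int)))
    (hrem : ∀ d ∈ rem, (d.map Prod.fst).Nodup) (item : Int) :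
    ∀ (bs : List Int) (fut0 : PySem.Dict Int (Int × Int)),
    ((bs.foldl (fun fut j =>
        ((PySem.List.enumerate (PySem.List.slice (PySem.List.pyGetD bq j [])
            (some (if PySem.List.pyGetD apos j 0 < 0 then 0 else PySem.List.pyGetD apos j 0 + 1))
            none) 0).foldl (fun sf oo =>
          (PySem.List.pyGetD rem oo.2 []).foldl (fun sf q =>
            if 0 < q.2 && !(PySem.Set.contains sf.1 q.1) then
              (PySem.Set.add sf.1 q.1,
               match sf.2.get? q.1 with
               | none => sf.2.insert q.1 (oo.1 + 1, j)
               | some old =>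
                 if pvPairLt (oo.1 + 1, j) old then sf.2.insert q.1 (oo.1 + 1, j) else sf.2)
            else sf) sf) (PySem.Set.empty, fut)).2) fut0).get? item)
    = pvFutureA apos bq rem item bs (fut0.get? item) := by
  intro bs
  induction bs with
  | nil => intro fut0; rfl
  | cons jj t ih =>
    intro fut0
    rw [List.foldl_cons, ih]
    show pvFutureA apos bq rem item t _ = _
    conv_rhs => rw [pvFutureA]
    congr 1
    set ap := PySem.List.pyGetD apos jj 0 with hap_def
    set q := PySem.List.pyGetD bq jj [] with hq_def
    set start : Int := if ap < 0 then 0 else ap + 1 with hstart_def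
    have hstart_nonneg : 0 ≤ start := by
      rw [hstart_def]; split <;> omega
    have hslice : PySem.List.slice q (some start) none = q.drop start.toNat :=
      PySem.List.slice_from q hstart_nonneg
    have hscan := pvBeltA rem item q ap (q.length - start.toNat) start.toNat rfl
    have hcast : ((start.toNat : Int)) = start := by omega
    rw [hcast] at hscan
    have hbelt := pvInnerBelt rem hrem item jj (q.drop start.toNat) 0
      PySem.Set.empty fut0
    rw [hslice, hbelt, hscan]
    have hempty : PySem.Set.contains PySem.Set.empty item = false := rfl
    rw [hempty]
    simp only [Bool.false_eq_true, if_false]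
    cases hfn : pvFirstNeed rem item (q.drop start.toNat) with
    | none => rfl
    | some off =>
      simp only [Option.map_some]
      have hdist : (if 0 ≤ ap then start + off - ap else start + off + 1) = off + 1 := by
        rw [hstart_def]
        by_cases h : ap < 0
        · rw [if_pos h, if_neg (by omega)]; ring
        · rw [if_neg h, if_pos (by omega)]; ring
      rw [hdist]
      have hz : (0 : Int) + off + 1 = off + 1 := by ring
      rw [hz]
      cases fut0.get? item
      · rfl
      · simp only [pvMinU]
        split <;> rfl
theorem pvFutEq (apos : List Int) (bq : List (List Int)) (rem : List (List (Int × Int)))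
    (hrem : ∀ d ∈ rem, (d.map Prod.fst).Nodup) (item : Int) :
    (pvFutB apos bq rem).get? item
    = pvFutureA apos bq rem item (PySem.List.pyRange 0 (PySem.List.len bq) 1) none := by
  rw [pvFutB, PySem.List.enumerate_eq_map_pyRange (d := []), List.foldl_map]
  have h := pvFutBridge apos bq rem hrem item (PySem.List.pyRange 0 (PySem.List.len bq) 1)
    PySem.Dict.empty
  rw [PySem.Dict.get?_empty] at h
  exact h
theorem pvRankEq (ao : List (Option Int)) (apos : List Int) (bq : List (List Int))
    (rem : List (List (Int × Int))) (hrem : ∀ d ∈ rem, (d.map Prod.fst).Nodup) :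
    pvRankA ao apos bq rem
    = pvRankB (pvActB (PySem.List.slice ao none (some (PySem.List.len bq))) rem)
        (pvFutB apos bq rem) := by
  funext item
  simp only [pvRankA, pvRankB]
  rw [pvActEq ao bq rem hrem item, pvFutEq apos bq rem hrem item]
theorem pvBestLemma (ao : List (Option Int)) (apos : List Int) (bq : List (List Int))
    (rem : List (List (Int × Int))) :
    ∀ (rest : List Int) (bi : Int),
    (pvBestA ao apos bq rem rest (some bi, some (pvRankA ao apos bq rem bi))).1
    = some (pvMinByRank (pvRankA ao apos bq rem) bi rest) := by
  intro rest
  induction rest with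
  | nil => intro bi; rfl
  | cons it r ih =>
    intro bi
    simp only [pvBestA, pvMinByRank]
    by_cases h : pvRankLt (pvRankA ao apos bq rem it) (pvRankA ao apos bq rem bi)
    · simp only [h, if_true]
      exact ih it
    · simp only [h, Bool.false_eq_true, if_false]
      exact ih bi
theorem choose_item_type_for_release_spec : Claim_equal_choose_item_type_for_release := by
  intro tc ao apos bq rem _ hpre
  obtain ⟨hrem, -⟩ := hpre
  unfold Spec_choose_item_type_for_release
  unfold choose_item_type_for_release choose_item_type_for_release_alt
  cases hc : (tc.filter (fun p => 0 < p.2)).map (·.1) with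
  | nil => simp
  | cons c cs =>
    simp only [List.isEmpty_cons, if_false, Bool.false_eq_true]
    have h0 : pvBestA ao apos bq rem (c :: cs) (none, none)
        = pvBestA ao apos bq rem cs (some c, some (pvRankA ao apos bq rem c)) := rfl
    rw [h0, pvBestLemma, pvRankEq ao apos bq rem hrem]
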